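-- pv_equiv track=rewrite | github.com/neonua/ceaser | prj_cesar/cesar_app/somedata.py | count
-- ===== SOURCE A (Python) =====
-- def list_count(cnt):
--     """
--     Conversion dictionary in to list.
--     The input is a dict
--     """
--     cnt_l = []
--     for key, value in cnt.items():
--         temp = [key, value]
--         cnt_l.append(temp)
--     return cnt_l
--
-- def count(text):
--     """
--     Counting characters without spaces.
--     The input is a words
--     """
--     cnt = {}
--     for i in text:
--         if i != ' ':
--             if i not in cnt:
--                 cnt[i] = 1
--             else:
--                 cnt[i] += 1
--     return list_count(cnt)
-- ===== SOURCE B (Python) =====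
-- def count(text):
--     """Distinct-then-rescan: ordered unique non-space chars, then str.count for each."""
--     uniq = dict.fromkeys(c for c in text if c != ' ')
--     return [[c, text.count(c)] for c in uniq]
-- ===== Notes on version B (the rewrite author's own statement) =====
-- stated objective: alternative
-- what changed: Replaces the single-pass incremental dict counting with a distinct-then-rescan strategy: build the ordered list of distinct non-space characters via dict.fromkeys, then emit [char, text.count(char)] for each.
import Mathlib
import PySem

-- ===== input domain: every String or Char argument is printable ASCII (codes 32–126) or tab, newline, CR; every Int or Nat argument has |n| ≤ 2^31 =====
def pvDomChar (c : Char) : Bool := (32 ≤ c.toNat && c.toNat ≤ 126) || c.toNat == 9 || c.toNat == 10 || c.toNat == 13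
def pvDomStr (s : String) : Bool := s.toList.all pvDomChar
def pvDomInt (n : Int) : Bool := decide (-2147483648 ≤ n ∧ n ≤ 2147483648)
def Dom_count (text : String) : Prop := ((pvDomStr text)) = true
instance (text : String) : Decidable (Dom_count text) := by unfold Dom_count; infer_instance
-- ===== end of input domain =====

-- B replaces A's single-pass incremental dict counting by a distinct-then-rescan strategy
-- (ordered dedup of the non-space characters, then one count per distinct character); objective: alternative.

-- ===== PORT A =====
-- list_count(cnt): appends [key, value] for each dict item (chars rendered as 1-char strings, as Python strings are)
def pvListCount (cnt : PySem.Dict Char Int) : List (String × Int) :=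
  cnt.items.foldl (fun acc kv => acc ++ [(String.ofList [kv.1], kv.2)]) []

def count (text : String) : List (String × Int) :=
  pvListCount
    (text.toList.foldl
      (fun cnt i =>
        if i ≠ ' ' then
          if cnt.contains i = false then cnt.insert i 1
          else cnt.insert i (cnt.getD i 0 + 1)
        else cnt)
      PySem.Dict.empty)

-- ===== PORT B =====
-- dict.fromkeys over the space-filtered text = PySem.List.dedup; text.count(c) for a single
-- character c is exactly the character count, ported as List.count over text.toList (exact).
def count_alt (text : String) : List (String × Int) :=
  (PySem.List.dedup (text.toList.filter (fun c => c ≠ ' '))).map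
    (fun c => (String.ofList [c], (text.toList.count c : Int)))

-- ===== PRECONDITION & SPEC =====
def Spec_count (text : String) (out : List (String × Int)) : Prop := out = count_alt text
instance (text : String) (out : List (String × Int)) : Decidable (Spec_count text out) := by unfold Spec_count; infer_instance

-- ===== CLAIM (what is proved, stated in full; the proofs are below) =====
def Claim_equal_count : Prop := ∀ (text : String), Dom_count text → Spec_count text (count text)

-- ===== LEMMAS AND PROOFS =====

-- A's two-branch dict update is pointwise the counter step (in the fresh-key branch getD is 0).
theorem count_step_eq (d : PySem.Dict Char Int) (c : Char) :
    (if d.contains c = false then d.insert c 1 else d.insert c (d.getD c 0 + 1))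
      = d.insert c (d.getD c 0 + 1) := by
  by_cases h : d.contains c = false
  · simp [h, PySem.Dict.getD_of_not_contains d (0 : Int) h]
  · simp [h]

-- ===== VERDICT (by name: the statement is the Claim_ definition above) =====
theorem count_spec : Claim_equal_count := by
  intro text _
  unfold Spec_count count count_alt pvListCount
  have h1 : (fun (cnt : PySem.Dict Char Int) (i : Char) =>
      if i ≠ ' ' then
        if cnt.contains i = false then cnt.insert i 1 else cnt.insert i (cnt.getD i 0 + 1)
      else cnt)
      = fun cnt i => if i ≠ ' ' then cnt.insert i (cnt.getD i 0 + 1) else cnt := by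
    funext d c
    by_cases hc : c = ' ' <;> simp [hc, count_step_eq]
  rw [h1]
  simp only [PySem.List.foldl_ite_eq_foldl_filter]
  rw [PySem.Dict.foldl_insert_getD_add_one_eq_counter,
      PySem.List.foldl_append_singleton_eq_map, PySem.Dict.items_counter, List.map_map,
      PySem.List.dedup_eq_ofList]
  refine List.map_congr_left (fun c hc => ?_)
  have hmem : c ∈ text.toList.filter (fun x => x ≠ ' ') := by
    simpa [PySem.Set.mem_ofList] using hc
  have hne : c ≠ ' ' := by
    have := List.of_mem_filter hmem; simpa using this
  have hcnt : List.count c (List.filter (fun x => !decide (x = ' ')) text.toList)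
      = List.count c text.toList := List.count_filter (by simpa using hne)
  simp [Function.comp, hcnt]
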